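-- pv_equiv track=rewrite | github.com/c-mita/AoC | 2024/18.py | find_first_failure
-- ===== SOURCE A (Python) =====
-- def bfs(start, target, bounds, blockers):
--     (lx, ly), (ux, uy) = bounds
--
--     def neighbours(point):
--         x, y = point
--         for nx, ny in ((x-1, y), (x+1, y), (x, y-1), (x, y+1)):
--             if (lx <= nx <= ux) and (ly <= ny <= uy) and ((nx, ny) not in blockers):
--                 yield nx, ny
--
--     current = [start]
--     visited = set(current)
--     d = 0
--     while current:
--         front = []
--         for node in current:
--             if node == target:
--                 return d
--             for p in neighbours(node):
--                 if p in visited: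
--                     continue
--                 visited.add(p)
--                 front.append(p)
--         d += 1
--         current = front
--     return -1
--
-- def find_first_failure(data):
--     low, high = 0, len(data)
--     start = (0, 0)
--     target = (70, 70)
--     bounds = ((0, 0), (70, 70))
--     while low < high:
--         mid = (low + high) // 2
--         result = bfs(start, target, bounds, set(data[:mid]))
--         if result == -1:
--             high = mid
--         else:
--             low = mid + 1
--     # the search fails with data[:low]
--     # the final value of data[:low] is data[low-1]
--     # so that is the index we return
--     return low - 1
-- ===== SOURCE B (Python) =====
-- def _connected(blockers):
--     # Bit-parallel flood fill over the fixed 71x71 grid: the whole reached region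
--     # lives in one big integer (one bit per cell, rows are 72 bits wide so the
--     # spare column stops horizontal shifts from wrapping between rows).
--     W = 72
--     free = 0
--     for y in range(71):
--         for x in range(71):
--             if (x, y) not in blockers:
--                 free |= 1 << (y * W + x)
--     reached = 1  # bit of the start cell (0, 0); the start floods even if blocked
--     while True:
--         nxt = reached | (free & ((reached << 1) | (reached >> 1)
--                                  | (reached << W) | (reached >> W)))
--         if nxt == reached:
--             return (reached >> (70 * W + 70)) & 1 == 1
--         reached = nxt
--
--
-- def find_first_failure(data):
--     low, high = 0, len(data)
--     while low < high:
--         mid = (low + high) // 2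
--         if _connected(set(data[:mid])):
--             low = mid + 1
--         else:
--             high = mid
--     return low - 1
-- ===== Notes on version B (the rewrite author's own statement) =====
-- stated objective: faster
-- what changed: The per-node BFS with a frontier list, visited set and distance counter is replaced by a bit-parallel flood fill: the whole 71x71 reached region lives in one big integer (one bit per cell, 72-bit-wide rows) and each round ORs four shifted copies against a precomputed free-cell mask until a fixpoint; the binary search stays, testing plain connectivity.
import Mathlib
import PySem

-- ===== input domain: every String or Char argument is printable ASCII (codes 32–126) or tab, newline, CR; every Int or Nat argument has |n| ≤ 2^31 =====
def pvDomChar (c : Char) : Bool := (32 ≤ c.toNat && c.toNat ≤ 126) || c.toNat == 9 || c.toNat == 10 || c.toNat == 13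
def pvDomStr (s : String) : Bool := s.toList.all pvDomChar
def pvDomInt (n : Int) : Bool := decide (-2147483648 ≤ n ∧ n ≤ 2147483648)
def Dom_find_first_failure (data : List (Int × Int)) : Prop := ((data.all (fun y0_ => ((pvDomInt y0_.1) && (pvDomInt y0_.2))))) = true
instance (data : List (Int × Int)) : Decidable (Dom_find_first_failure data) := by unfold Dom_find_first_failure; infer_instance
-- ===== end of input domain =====

-- B replaces the per-node BFS inside the binary search by a bit-parallel flood fill
-- (the whole 71×71 reached region lives in one big integer), for a constant-factor speedup.

-- ===== PORT A =====
def pvNeighbours (bounds : (Int × Int) × (Int × Int)) (blockers : PySem.Set (Int × Int))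
    (point : Int × Int) : List (Int × Int) :=
  [(point.1 - 1, point.2), (point.1 + 1, point.2), (point.1, point.2 - 1), (point.1, point.2 + 1)].filter
    (fun q => (bounds.1.1 ≤ q.1 && q.1 ≤ bounds.2.1) && (bounds.1.2 ≤ q.2 && q.2 ≤ bounds.2.2)
              && !(PySem.Set.contains blockers q))

-- inner 'for p in neighbours(node)' loop: skip if visited, else add to visited and front
def pvScanNbrs (nbrs : List (Int × Int)) (visited : PySem.Set (Int × Int))
    (front : List (Int × Int)) : PySem.Set (Int × Int) × List (Int × Int) :=
  match nbrs with
  | [] => (visited, front)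
  | p :: rest =>
    if PySem.Set.contains visited p then pvScanNbrs rest visited front
    else pvScanNbrs rest (PySem.Set.add visited p) (front ++ [p])

-- 'for node in current' loop; none = early 'return d' (target found)
def pvScanCurrent (target : Int × Int) (bounds : (Int × Int) × (Int × Int))
    (blockers : PySem.Set (Int × Int)) :
    List (Int × Int) → PySem.Set (Int × Int) → List (Int × Int) →
    Option (PySem.Set (Int × Int) × List (Int × Int))
  | [], visited, front => some (visited, front)
  | node :: rest, visited, front =>
    if node = target then none
    else
      match pvScanNbrs (pvNeighbours bounds blockers node) visited front with
      | (v', f') => pvScanCurrent target bounds blockers rest v' f'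

-- the 'while current:' loop of bfs; the fuel only totalises the recursion
-- (visited grows every productive round and stays inside the 71×71 grid plus the
-- start cell, so 5200 rounds always suffice — proved below, the 0-branch is dead)
def pvBfsLoop (target : Int × Int) (bounds : (Int × Int) × (Int × Int))
    (blockers : PySem.Set (Int × Int)) :
    Nat → List (Int × Int) → PySem.Set (Int × Int) → Int → Int
  | 0, _, _, _ => -1
  | fuel + 1, current, visited, d =>
    if current = [] then -1
    else
      match pvScanCurrent target bounds blockers current visited [] with
      | none => d
      | some (v', front) => pvBfsLoop target bounds blockers fuel front v' (d + 1)

def pvBfs (start target : Int × Int) (bounds : (Int × Int) × (Int × Int))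
    (blockers : PySem.Set (Int × Int)) : Int :=
  pvBfsLoop target bounds blockers 5200 [start] (PySem.Set.ofList [start]) 0

-- the 'while low < high:' loop; fuel len(data)+1 only totalises (high - low shrinks
-- every round, and at exhausted fuel the loop exit value low - 1 is returned anyway)
def pvSearchA (data : List (Int × Int)) : Nat → Int → Int → Int
  | 0, low, _ => low - 1
  | fuel + 1, low, high =>
    if low < high then
      let mid := PySem.Int.floordiv (low + high) 2
      let result := pvBfs (0, 0) (70, 70) ((0, 0), (70, 70))
          (PySem.Set.ofList (PySem.List.slice data none (some mid)))
      if result = -1 then pvSearchA data fuel low mid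
      else pvSearchA data fuel (mid + 1) high
    else low - 1

def find_first_failure (data : List (Int × Int)) : Int :=
  pvSearchA data (data.length + 1) 0 (data.length : Int)

-- ===== PORT B =====
-- free |= 1 << (y*72 + x) for every free cell; both loop indices are nonnegative,
-- so .toNat on the bit position is exact
def pvFreeMask (blockers : PySem.Set (Int × Int)) : Nat :=
  (PySem.List.pyRange 0 71 1).foldl (fun acc y =>
    (PySem.List.pyRange 0 71 1).foldl (fun acc x =>
      if PySem.Set.contains blockers (x, y) then acc
      else acc ||| (1 <<< (y * 72 + x).toNat)) acc) 0

-- the 'while True:' saturation loop; the fuel only totalises the recursion (the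
-- popcount of reached grows every round until the fixpoint, and all bits live below
-- 71*72+71, so 5200 rounds always suffice — proved below, the 0-branch is dead)
def pvSatLoop (free : Nat) : Nat → Nat → Nat
  | 0, reached => reached
  | fuel + 1, reached =>
    let nxt := reached ||| (free &&& ((reached <<< 1) ||| (reached >>> 1)
                                      ||| (reached <<< 72) ||| (reached >>> 72)))
    if nxt = reached then reached else pvSatLoop free fuel nxt

def pvConnected (blockers : PySem.Set (Int × Int)) : Bool :=
  ((pvSatLoop (pvFreeMask blockers) 5200 1) >>> (70 * 72 + 70)) &&& 1 == 1

def pvSearchB (data : List (Int × Int)) : Nat → Int → Int → Int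
  | 0, low, _ => low - 1
  | fuel + 1, low, high =>
    if low < high then
      let mid := PySem.Int.floordiv (low + high) 2
      if pvConnected (PySem.Set.ofList (PySem.List.slice data none (some mid))) then
        pvSearchB data fuel (mid + 1) high
      else pvSearchB data fuel low mid
    else low - 1

def find_first_failure_alt (data : List (Int × Int)) : Int :=
  pvSearchB data (data.length + 1) 0 (data.length : Int)

-- ===== PRECONDITION & SPEC =====
def Spec_find_first_failure (data : List (Int × Int)) (out : Int) : Prop := out = find_first_failure_alt data
instance (data : List (Int × Int)) (out : Int) : Decidable (Spec_find_first_failure data out) := by unfold Spec_find_first_failure; infer_instance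

-- ===== CLAIM (what is proved, stated in full; the proofs are below) =====
def Claim_equal_find_first_failure : Prop := ∀ (data : List (Int × Int)), Dom_find_first_failure data → Spec_find_first_failure data (find_first_failure data)

-- ===== LEMMAS AND PROOFS =====

-- the shared mathematical yardstick: one BFS/flood step of A's fixed-bounds graph
def pvStep (b : PySem.Set (Int × Int)) (u v : Int × Int) : Prop :=
  v ∈ pvNeighbours ((0, 0), (70, 70)) b u

-- reachability from the start cell (0,0)
def pvReach (b : PySem.Set (Int × Int)) (v : Int × Int) : Prop :=
  Relation.ReflTransGen (pvStep b) (0, 0) v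

def pvInB (p : Int × Int) : Prop := 0 ≤ p.1 ∧ p.1 ≤ 70 ∧ 0 ≤ p.2 ∧ p.2 ≤ 70

-- cells the BFS may ever visit: the start plus free in-bounds cells
def pvVOK (b : PySem.Set (Int × Int)) (p : Int × Int) : Prop :=
  p = (0, 0) ∨ (pvInB p ∧ p ∉ b)

lemma pv_mem_nbrs (b : PySem.Set (Int × Int)) (u p : Int × Int) :
    p ∈ pvNeighbours ((0, 0), (70, 70)) b u ↔
      (p = (u.1 - 1, u.2) ∨ p = (u.1 + 1, u.2) ∨ p = (u.1, u.2 - 1) ∨ p = (u.1, u.2 + 1)) ∧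
      pvInB p ∧ p ∉ b := by
  simp [pvNeighbours, List.mem_filter, pvInB, and_assoc]

lemma pv_scanNbrs_mem_visited (nbrs : List (Int × Int)) :
    ∀ (v : PySem.Set (Int × Int)) (f : List (Int × Int)) (x : Int × Int),
      x ∈ (pvScanNbrs nbrs v f).1 ↔ x ∈ v ∨ x ∈ nbrs := by
  induction nbrs with
  | nil => simp [pvScanNbrs]
  | cons p rest ih =>
    intro v f x
    simp only [pvScanNbrs]
    split <;> rename_i h
    · rw [PySem.Set.contains_iff] at h
      rw [ih]
      simp only [List.mem_cons]
      constructor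
      · tauto
      · rintro (hv | rfl | hr) <;> tauto
    · have hnv : p ∉ v := by simpa using h
      rw [ih]
      simp only [PySem.Set.mem_add _ _ _, List.mem_cons]
      tauto

lemma pv_scanNbrs_mem_front (nbrs : List (Int × Int)) :
    ∀ (v : PySem.Set (Int × Int)) (f : List (Int × Int)), (∀ x ∈ f, x ∈ v) →
      ∀ (x : Int × Int), x ∈ (pvScanNbrs nbrs v f).2 ↔ x ∈ f ∨ (x ∈ nbrs ∧ x ∉ v) := by
  induction nbrs with
  | nil => simp [pvScanNbrs]
  | cons p rest ih =>
    intro v f hf x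
    simp only [pvScanNbrs]
    split <;> rename_i h
    · rw [PySem.Set.contains_iff] at h
      rw [ih v f hf]
      simp only [List.mem_cons]
      constructor
      · tauto
      · rintro (hv | ⟨(rfl | hr), hnv⟩) <;> tauto
    · have hnv : p ∉ v := by simpa using h
      rw [ih (PySem.Set.add v p) (f ++ [p]) ?side x]
      case side =>
        intro y hy
        rcases List.mem_append.mp hy with hy | hy
        · exact (PySem.Set.mem_add _ _ _).mpr (Or.inl (hf y hy))
        · simp only [List.mem_singleton] at hy
          exact (PySem.Set.mem_add _ _ _).mpr (Or.inr hy)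
      simp only [List.mem_append, List.mem_cons, List.not_mem_nil, or_false, PySem.Set.mem_add _ _ _]
      constructor
      · rintro ((hv | rfl) | ⟨hr, hnv'⟩)
        · tauto
        · tauto
        · simp only [not_or] at hnv'; tauto
      · rintro (hv | ⟨(rfl | hr), hnv'⟩)
        · tauto
        · tauto
        · by_cases hxp : x = p
          · subst hxp; tauto
          · refine Or.inr ⟨hr, ?_⟩
            simp only [not_or]
            exact ⟨hnv', hxp⟩

lemma pv_scanNbrs_nodup (nbrs : List (Int × Int)) :
    ∀ (v : PySem.Set (Int × Int)) (f : List (Int × Int)), v.Nodup →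
      (pvScanNbrs nbrs v f).1.Nodup := by
  induction nbrs with
  | nil => intro v f h; simpa [pvScanNbrs] using h
  | cons p rest ih =>
    intro v f h
    simp only [pvScanNbrs]
    split
    · exact ih v f h
    · exact ih _ _ (PySem.Set.nodup_add _ p h)

lemma pv_scanNbrs_len (nbrs : List (Int × Int)) :
    ∀ (v : PySem.Set (Int × Int)) (f : List (Int × Int)),
      (pvScanNbrs nbrs v f).1.length + f.length = v.length + (pvScanNbrs nbrs v f).2.length := by
  induction nbrs with
  | nil => intro v f; simp [pvScanNbrs]
  | cons p rest ih =>
    intro v f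
    simp only [pvScanNbrs]
    split <;> rename_i h
    · exact ih v f
    · have hnv : p ∉ v := by simpa using h
      have := ih (PySem.Set.add v p) (f ++ [p])
      rw [PySem.Set.add_of_not_mem hnv] at this ⊢
      simp only [List.length_append, List.length_singleton] at this ⊢
      omega

lemma pv_scanCurrent_none_iff (t : Int × Int) (bo : (Int × Int) × (Int × Int))
    (b : PySem.Set (Int × Int)) (cur : List (Int × Int)) :
    ∀ (v : PySem.Set (Int × Int)) (f : List (Int × Int)),
      (pvScanCurrent t bo b cur v f = none ↔ t ∈ cur) := by
  induction cur with
  | nil => intro v f; simp [pvScanCurrent]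
  | cons node rest ih =>
    intro v f
    simp only [pvScanCurrent]
    split <;> rename_i h
    · subst h; simp
    · rw [ih]
      simp only [List.mem_cons]
      constructor
      · tauto
      · rintro (rfl | hr)
        · exact absurd rfl h
        · exact hr

lemma pv_scanCurrent_spec (t : Int × Int) (b : PySem.Set (Int × Int)) (cur : List (Int × Int)) :
    ∀ (v : PySem.Set (Int × Int)) (f : List (Int × Int)), t ∉ cur → (∀ x ∈ f, x ∈ v) →
      ∃ v' f', pvScanCurrent t ((0, 0), (70, 70)) b cur v f = some (v', f') ∧
        (∀ x, x ∈ v' ↔ x ∈ v ∨ ∃ n ∈ cur, x ∈ pvNeighbours ((0, 0), (70, 70)) b n) ∧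
        (∀ x, x ∈ f' ↔ x ∈ f ∨ ((∃ n ∈ cur, x ∈ pvNeighbours ((0, 0), (70, 70)) b n) ∧ x ∉ v)) ∧
        (v.Nodup → v'.Nodup) ∧ v'.length + f.length = v.length + f'.length ∧
        (∀ x ∈ f', x ∈ v') := by
  induction cur with
  | nil =>
    intro v f _ hf
    exact ⟨v, f, rfl, by simp, by simp, fun h => h, by omega, hf⟩
  | cons node rest ih =>
    intro v f ht hf
    have hnt : node ≠ t := fun h => ht (by simp [h])
    have htr : t ∉ rest := fun h => ht (by simp [h])
    simp only [pvScanCurrent, if_neg (fun h => hnt h)]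
    set pr := pvScanNbrs (pvNeighbours ((0, 0), (70, 70)) b node) v f with hpr
    have hm1 := pv_scanNbrs_mem_visited (pvNeighbours ((0, 0), (70, 70)) b node) v f
    have hm2 := pv_scanNbrs_mem_front (pvNeighbours ((0, 0), (70, 70)) b node) v f hf
    have hnd := pv_scanNbrs_nodup (pvNeighbours ((0, 0), (70, 70)) b node) v f
    have hlen := pv_scanNbrs_len (pvNeighbours ((0, 0), (70, 70)) b node) v f
    rw [← hpr] at hm1 hm2 hnd hlen
    have hsub : ∀ x ∈ pr.2, x ∈ pr.1 := by
      intro x hx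
      rcases (hm2 x).mp hx with hx | ⟨hx, _⟩
      · exact (hm1 x).mpr (Or.inl (hf x hx))
      · exact (hm1 x).mpr (Or.inr hx)
    obtain ⟨v', f', heq, hv', hf', hnd', hlen', hsub'⟩ := ih pr.1 pr.2 htr hsub
    refine ⟨v', f', heq, ?_, ?_, fun h => hnd' (hnd h), by omega, hsub'⟩
    · intro x
      rw [hv' x, hm1 x]
      simp only [List.mem_cons]
      constructor
      · rintro ((hv | hn) | ⟨n, hn, hx⟩) <;> [tauto; exact Or.inr ⟨node, Or.inl rfl, hn⟩;
          exact Or.inr ⟨n, Or.inr hn, hx⟩]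
      · rintro (hv | ⟨n, (rfl | hn), hx⟩) <;> tauto
    · intro x
      rw [hf' x, hm2 x]
      simp only [List.mem_cons, hm1 x, not_or]
      constructor
      · rintro ((hv | ⟨hn, hnv⟩) | ⟨⟨n, hn, hx⟩, hnv, hnn⟩)
        · tauto
        · exact Or.inr ⟨⟨node, Or.inl rfl, hn⟩, hnv⟩
        · exact Or.inr ⟨⟨n, Or.inr hn, hx⟩, hnv⟩
      · rintro (hv | ⟨⟨n, (rfl | hn), hx⟩, hnv⟩)
        · tauto
        · exact Or.inl (Or.inr ⟨hx, hnv⟩)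
        · by_cases hxn : x ∈ pvNeighbours ((0, 0), (70, 70)) b node
          · exact Or.inl (Or.inr ⟨hxn, hnv⟩)
          · exact Or.inr ⟨⟨n, hn, hx⟩, hnv, hxn⟩

-- a nodup list of admissible cells has at most 5042 entries (71*71 grid cells + start)
lemma pv_visited_bound (b : PySem.Set (Int × Int)) (v : List (Int × Int)) (hnd : v.Nodup)
    (hok : ∀ x ∈ v, pvVOK b x) : v.length ≤ 5042 := by
  classical
  let e : Int × Int → Nat := fun p => if p = (0, 0) then 0 else (p.2 * 71 + p.1 + 1).toNat
  have hinj : ∀ x ∈ v, ∀ y ∈ v, e x = e y → x = y := by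
    intro x hx y hy hxy
    rcases hok x hx with hx0 | ⟨⟨hx1, hx2, hx3, hx4⟩, _⟩ <;>
      rcases hok y hy with hy0 | ⟨⟨hy1, hy2, hy3, hy4⟩, _⟩
    · rw [hx0, hy0]
    · subst hx0
      by_cases hy0 : y = (0, 0)
      · exact hy0.symm
      · simp only [e, if_pos rfl, if_neg hy0] at hxy
        omega
    · subst hy0
      by_cases hx0 : x = (0, 0)
      · exact hx0
      · simp only [e, if_pos rfl, if_neg hx0] at hxy
        omega
    · by_cases hx0 : x = (0, 0) <;> by_cases hy0 : y = (0, 0)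
      · rw [hx0, hy0]
      · simp only [e, if_pos hx0, if_neg hy0] at hxy; omega
      · simp only [e, if_neg hx0, if_pos hy0] at hxy; omega
      · simp only [e, if_neg hx0, if_neg hy0] at hxy
        have h1 : x.2 * 71 + x.1 = y.2 * 71 + y.1 := by omega
        have hx : x.1 = y.1 ∧ x.2 = y.2 := by omega
        exact Prod.ext hx.1 hx.2
  have hndm : (v.map e).Nodup := List.Nodup.map_on hinj hnd
  have hlt : ∀ n ∈ v.map e, n < 5042 := by
    intro n hn
    rcases List.mem_map.mp hn with ⟨p, hp, rfl⟩
    rcases hok p hp with h0 | ⟨⟨h1, h2, h3, h4⟩, _⟩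
    · simp [e, h0]
    · by_cases h0 : p = (0, 0)
      · simp [e, h0]
      · simp only [e, if_neg h0]; omega
  have hsub : (v.map e).toFinset ⊆ Finset.range 5042 := by
    intro n hn
    rw [Finset.mem_range]
    exact hlt n (List.mem_toFinset.mp hn)
  have := Finset.card_le_card hsub
  rw [Finset.card_range, List.toFinset_card_of_nodup hndm] at this
  simpa using this

lemma pv_reach_subset_closed' (P : Int × Int → Int × Int → Prop) (v : List (Int × Int))
    (h0 : (0, 0) ∈ v)
    (hcl : ∀ x ∈ v, ∀ p, P x p → p ∈ v) :
    ∀ y, Relation.ReflTransGen P (0, 0) y → y ∈ v := by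
  intro y hy
  induction hy with
  | refl => exact h0
  | tail _ hstep ih => exact hcl _ ih _ hstep

lemma pv_bfsLoop_nil (t : Int × Int) (bo : (Int × Int) × (Int × Int))
    (b : PySem.Set (Int × Int)) (fuel : Nat) (v : PySem.Set (Int × Int)) (d : Int) :
    pvBfsLoop t bo b fuel [] v d = -1 := by
  cases fuel <;> simp [pvBfsLoop]

lemma pv_bfsLoop_neg1_iff (b : PySem.Set (Int × Int)) :
    ∀ (fuel : Nat) (cur : List (Int × Int)) (v : PySem.Set (Int × Int)) (d : Int),
      (0, 0) ∈ v → (∀ x ∈ cur, x ∈ v) → (∀ x ∈ v, pvReach b x) →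
      (∀ x ∈ v, x ∉ cur → ∀ p ∈ pvNeighbours ((0, 0), (70, 70)) b x, p ∈ v) →
      ((70, 70) ∈ v → (70, 70) ∈ cur) → v.Nodup → (∀ x ∈ v, pvVOK b x) → 0 ≤ d →
      5044 ≤ fuel + v.length →
      (pvBfsLoop (70, 70) ((0, 0), (70, 70)) b fuel cur v d = -1 ↔ ¬ pvReach b (70, 70)) := by
  intro fuel
  induction fuel with
  | zero =>
    intro cur v d _ _ _ _ _ hnd hok _ hF
    exfalso
    have hb := pv_visited_bound b v hnd hok
    omega
  | succ fuel ih =>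
    intro cur v d h0 h1 h2 h3 h4 hnd hok hd hF
    simp only [pvBfsLoop]
    by_cases hcur : cur = []
    · subst hcur
      rw [if_pos rfl]
      constructor
      · intro _ hr
        have hcl : ∀ x ∈ v, ∀ p, pvStep b x p → p ∈ v := by
          intro x hx p hp
          exact h3 x hx (by simp) p hp
        have := pv_reach_subset_closed' (pvStep b) v h0 hcl (70, 70) hr
        simpa using h4 this
      · intro _; rfl
    · rw [if_neg hcur]
      by_cases ht : (70, 70) ∈ cur
      · rw [(pv_scanCurrent_none_iff (70, 70) ((0, 0), (70, 70)) b cur v []).mpr ht]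
        have hr : pvReach b (70, 70) := h2 _ (h1 _ ht)
        show d = -1 ↔ _
        constructor
        · intro hdm; exfalso; omega
        · intro hnr; exact absurd hr hnr
      · obtain ⟨v', f', heq, hv', hf', hnd', hlen', hsub'⟩ :=
          pv_scanCurrent_spec (70, 70) b cur v [] ht (by simp)
        rw [heq]
        -- shared facts
        have hvsub : ∀ x ∈ v, x ∈ v' := fun x hx => (hv' x).mpr (Or.inl hx)
        have hcl' : ∀ x ∈ v', x ∉ f' → ∀ p ∈ pvNeighbours ((0, 0), (70, 70)) b x, p ∈ v' := by
          intro x hx hxf p hp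
          rcases (hv' x).mp hx with hxv | ⟨n, hn, hxn⟩
          · by_cases hxc : x ∈ cur
            · exact (hv' p).mpr (Or.inr ⟨x, hxc, hp⟩)
            · exact hvsub p (h3 x hxv hxc p hp)
          · -- x is newly visited; if x ∉ f' then x ∈ v already
            by_cases hxv : x ∈ v
            · by_cases hxc : x ∈ cur
              · exact (hv' p).mpr (Or.inr ⟨x, hxc, hp⟩)
              · exact hvsub p (h3 x hxv hxc p hp)
            · exact absurd ((hf' x).mpr (Or.inr ⟨⟨n, hn, hxn⟩, hxv⟩)) hxf
        have ht' : (70, 70) ∉ v := fun hm => ht (h4 hm)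
        have hI4' : (70, 70) ∈ v' → (70, 70) ∈ f' := by
          intro hm
          rcases (hv' (70, 70)).mp hm with hm | ⟨n, hn, hmn⟩
          · exact absurd hm ht'
          · exact (hf' (70, 70)).mpr (Or.inr ⟨⟨n, hn, hmn⟩, ht'⟩)
        have hok' : ∀ x ∈ v', pvVOK b x := by
          intro x hx
          rcases (hv' x).mp hx with hx | ⟨n, _, hxn⟩
          · exact hok x hx
          · rcases (pv_mem_nbrs b n x).mp hxn with ⟨_, hin, hnb⟩
            exact Or.inr ⟨hin, hnb⟩
        have h2' : ∀ x ∈ v', pvReach b x := by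
          intro x hx
          rcases (hv' x).mp hx with hx | ⟨n, hn, hxn⟩
          · exact h2 x hx
          · exact Relation.ReflTransGen.tail (h2 n (h1 n hn)) hxn
        by_cases hfr : f' = []
        · subst hfr
          show pvBfsLoop (70, 70) ((0, 0), (70, 70)) b fuel [] v' (d + 1) = -1 ↔ _
          rw [pv_bfsLoop_nil]
          simp only [true_iff]
          intro hr
          have hcl : ∀ x ∈ v', ∀ p, pvStep b x p → p ∈ v' := by
            intro x hx p hp
            exact hcl' x hx (by simp) p hp
          have := pv_reach_subset_closed' (pvStep b) v' (hvsub _ h0) hcl (70, 70) hr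
          simp at this
          exact absurd (hI4' this) (by simp)
        · -- front nonempty: visited strictly grew
          have hgrow : v.length + 1 ≤ v'.length := by
            rcases List.exists_mem_of_ne_nil f' hfr with ⟨x, hx⟩
            have hxv : x ∉ v := by
              rcases (hf' x).mp hx with hc | ⟨_, hc⟩
              · simp at hc
              · exact hc
            have hcons : (x :: v).Nodup := List.nodup_cons.mpr ⟨hxv, hnd⟩
            have hsub : x :: v ⊆ v' := by
              intro y hy
              rcases List.mem_cons.mp hy with rfl | hy
              · exact hsub' _ hx
              · exact hvsub y hy
            have := (hcons.subperm hsub).length_le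
            simpa using this
          show pvBfsLoop (70, 70) ((0, 0), (70, 70)) b fuel f' v' (d + 1) = -1 ↔ _
          exact ih f' v' (d + 1) (hvsub _ h0) hsub' h2' hcl' hI4' (hnd' hnd) hok'
            (by omega) (by omega)

lemma pv_bfs_neg1_iff (b : PySem.Set (Int × Int)) :
    (pvBfs (0, 0) (70, 70) ((0, 0), (70, 70)) b = -1 ↔ ¬ pvReach b (70, 70)) := by
  have h : PySem.Set.ofList [((0 : Int), (0 : Int))] = [(0, 0)] := by decide
  unfold pvBfs
  rw [h]
  apply pv_bfsLoop_neg1_iff b 5200 [(0, 0)] [(0, 0)] 0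
  · simp
  · simp
  · intro x hx; simp at hx; subst hx; exact Relation.ReflTransGen.refl
  · intro x hx hxc; simp at hx; simp [hx] at hxc
  · intro h; simp at h
  · simp
  · intro x hx; simp at hx; subst hx; exact Or.inl rfl
  · omega
  · simp

-- ===== B-side =====
def pvIdx (p : Int × Int) : Nat := (p.2 * 72 + p.1).toNat

def pvGoodIdx (i : Nat) : Prop := ∃ x y : Nat, x ≤ 70 ∧ y ≤ 70 ∧ i = y * 72 + x

def pvRinv (r : Nat) : Prop := ∀ i, r.testBit i = true → pvGoodIdx i

def pvSound (b : PySem.Set (Int × Int)) (r : Nat) : Prop :=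
  ∀ p : Int × Int, pvInB p → r.testBit (pvIdx p) = true → pvReach b p

def pvBC (r : Nat) : Nat := ((Finset.range 5200).filter (fun i => r.testBit i)).card

lemma pv_testBit_one_shift (n i : Nat) : (1 <<< n).testBit i = decide (n = i) := by
  rw [Nat.one_shiftLeft]
  exact Nat.testBit_two_pow

lemma pv_testBit_inner (b : PySem.Set (Int × Int)) (y : Int) (i : Nat) :
    ∀ (xs : List Int) (acc : Nat),
      ((xs.foldl (fun acc x =>
        if PySem.Set.contains b (x, y) then acc
        else acc ||| (1 <<< (y * 72 + x).toNat)) acc).testBit i = true ↔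
      acc.testBit i = true ∨ ∃ x ∈ xs, (x, y) ∉ b ∧ i = (y * 72 + x).toNat) := by
  intro xs
  induction xs with
  | nil => simp
  | cons x rest ih =>
    intro acc
    simp only [List.foldl_cons]
    rw [ih]
    split <;> rename_i h
    · have hmem : (x, y) ∈ b := by simpa using h
      simp only [List.mem_cons]
      constructor
      · rintro (ha | ⟨x', hx', hnb, hi⟩)
        · tauto
        · exact Or.inr ⟨x', Or.inr hx', hnb, hi⟩
      · rintro (ha | ⟨x', (rfl | hx'), hnb, hi⟩)
        · tauto
        · exact absurd hmem hnb
        · exact Or.inr ⟨x', hx', hnb, hi⟩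
    · have hmem : (x, y) ∉ b := by simpa using h
      simp only [Nat.testBit_or, Bool.or_eq_true, pv_testBit_one_shift, decide_eq_true_eq,
        List.mem_cons]
      constructor
      · rintro ((ha | hi) | ⟨x', hx', hnb, hi⟩)
        · tauto
        · exact Or.inr ⟨x, Or.inl rfl, hmem, hi.symm⟩
        · exact Or.inr ⟨x', Or.inr hx', hnb, hi⟩
      · rintro (ha | ⟨x', (rfl | hx'), hnb, hi⟩)
        · tauto
        · exact Or.inl (Or.inr hi.symm)
        · exact Or.inr ⟨x', hx', hnb, hi⟩

lemma pv_testBit_freeMask (b : PySem.Set (Int × Int)) (i : Nat) :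
    (pvFreeMask b).testBit i = true ↔
      ∃ x y : Nat, x ≤ 70 ∧ y ≤ 70 ∧ i = y * 72 + x ∧ ((x : Int), (y : Int)) ∉ b := by
  unfold pvFreeMask
  have houter : ∀ (ys : List Int) (acc : Nat),
      ((ys.foldl (fun acc y =>
        (PySem.List.pyRange 0 71 1).foldl (fun acc x =>
          if PySem.Set.contains b (x, y) then acc
          else acc ||| (1 <<< (y * 72 + x).toNat)) acc) acc).testBit i = true ↔
      acc.testBit i = true ∨ ∃ y ∈ ys, ∃ x ∈ PySem.List.pyRange 0 71 1,
        (x, y) ∉ b ∧ i = (y * 72 + x).toNat) := by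
    intro ys
    induction ys with
    | nil => simp
    | cons y rest ih =>
      intro acc
      simp only [List.foldl_cons]
      rw [ih, pv_testBit_inner]
      simp only [List.mem_cons]
      constructor
      · rintro ((ha | ⟨x, hx, hnb, hi⟩) | ⟨y', hy', x, hx, hnb, hi⟩)
        · tauto
        · exact Or.inr ⟨y, Or.inl rfl, x, hx, hnb, hi⟩
        · exact Or.inr ⟨y', Or.inr hy', x, hx, hnb, hi⟩
      · rintro (ha | ⟨y', (rfl | hy'), x, hx, hnb, hi⟩)
        · tauto
        · exact Or.inl (Or.inr ⟨x, hx, hnb, hi⟩)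
        · exact Or.inr ⟨y', hy', x, hx, hnb, hi⟩
  rw [houter]
  simp only [Nat.zero_testBit, Bool.false_eq_true, false_or, PySem.List.mem_pyRange_one]
  constructor
  · rintro ⟨y, ⟨hy0, hy1⟩, x, ⟨hx0, hx1⟩, hnb, hi⟩
    refine ⟨x.toNat, y.toNat, by omega, by omega, by omega, ?_⟩
    rwa [Int.toNat_of_nonneg hx0, Int.toNat_of_nonneg hy0]
  · rintro ⟨x, y, hx, hy, hi, hnb⟩
    refine ⟨(y : Int), by omega, (x : Int), by omega, hnb, by omega⟩

lemma pv_testBit_next (r free : Nat) (i : Nat) :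
    (r ||| (free &&& ((r <<< 1) ||| (r >>> 1) ||| (r <<< 72) ||| (r >>> 72)))).testBit i = true ↔
      r.testBit i = true ∨ (free.testBit i = true ∧
        ((1 ≤ i ∧ r.testBit (i - 1) = true) ∨ r.testBit (1 + i) = true ∨
         (72 ≤ i ∧ r.testBit (i - 72) = true) ∨ r.testBit (72 + i) = true)) := by
  simp only [Nat.testBit_or, Nat.testBit_and, Nat.testBit_shiftLeft, Nat.testBit_shiftRight,
    Bool.or_eq_true, Bool.and_eq_true, decide_eq_true_eq]
  constructor
  · rintro (h | ⟨hf, h⟩) <;> [tauto; exact Or.inr ⟨hf, by tauto⟩]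
  · rintro (h | ⟨hf, h⟩) <;> [tauto; exact Or.inr ⟨hf, by tauto⟩]

lemma pv_bm_next (b : PySem.Set (Int × Int)) (r : Nat) (hInv : pvRinv r) (p : Int × Int)
    (hp : pvInB p) :
    ((r ||| (pvFreeMask b &&& ((r <<< 1) ||| (r >>> 1) ||| (r <<< 72) ||| (r >>> 72)))).testBit (pvIdx p) = true) ↔
      (r.testBit (pvIdx p) = true ∨
        (p ∉ b ∧ ∃ q : Int × Int, pvInB q ∧ r.testBit (pvIdx q) = true ∧
          p ∈ pvNeighbours ((0, 0), (70, 70)) b q)) := by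
  obtain ⟨px, py⟩ := p
  obtain ⟨hp1, hp2, hp3, hp4⟩ := hp
  simp only at hp1 hp2 hp3 hp4
  have hpidx : pvIdx (px, py) = py.toNat * 72 + px.toNat := by unfold pvIdx; omega
  rw [pv_testBit_next, pv_testBit_freeMask]
  constructor
  · rintro (h | ⟨⟨fx, fy, hfx, hfy, hfi, hfnb⟩, hcase⟩)
    · exact Or.inl h
    · have hfp : ((fx : Int), (fy : Int)) = (px, py) := by
        have : (fx : Int) = px ∧ (fy : Int) = py := by
          constructor <;> omega
        rw [this.1, this.2]
      rw [hfp] at hfnb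
      refine Or.inr ⟨hfnb, ?_⟩
      rcases hcase with ⟨h1, hb⟩ | hb | ⟨h1, hb⟩ | hb
      · obtain ⟨x', y', hx', hy', he⟩ := hInv _ hb
        have hbnd : 1 ≤ px := by simp only [pvIdx] at *; omega
        have hidx : pvIdx ((px - 1 : Int), py) = pvIdx (px, py) - 1 := by simp only [pvIdx] at *; omega
        refine ⟨((px - 1 : Int), py), ?_, by rw [hidx]; exact hb, ?_⟩
        · unfold pvInB
          refine ⟨?_, ?_, ?_, ?_⟩ <;> simp <;> omega
        · rw [pv_mem_nbrs]
          exact ⟨Or.inr <| Or.inl <| (by show (px, py) = (px - 1 + 1, py); rw [show px - 1 + 1 = px by omega]),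
            by unfold pvInB; exact ⟨hp1, hp2, hp3, hp4⟩, hfnb⟩
      · obtain ⟨x', y', hx', hy', he⟩ := hInv _ hb
        have hbnd : px ≤ 69 := by simp only [pvIdx] at *; omega
        have hidx : pvIdx ((px + 1 : Int), py) = 1 + pvIdx (px, py) := by simp only [pvIdx] at *; omega
        refine ⟨((px + 1 : Int), py), ?_, by rw [hidx]; exact hb, ?_⟩
        · unfold pvInB
          refine ⟨?_, ?_, ?_, ?_⟩ <;> simp <;> omega
        · rw [pv_mem_nbrs]
          exact ⟨Or.inl <| (by show (px, py) = (px + 1 - 1, py); rw [show px + 1 - 1 = px by omega]),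
            by unfold pvInB; exact ⟨hp1, hp2, hp3, hp4⟩, hfnb⟩
      · obtain ⟨x', y', hx', hy', he⟩ := hInv _ hb
        have hbnd : 1 ≤ py := by simp only [pvIdx] at *; omega
        have hidx : pvIdx (px, (py - 1 : Int)) = pvIdx (px, py) - 72 := by simp only [pvIdx] at *; omega
        refine ⟨(px, (py - 1 : Int)), ?_, by rw [hidx]; exact hb, ?_⟩
        · unfold pvInB
          refine ⟨?_, ?_, ?_, ?_⟩ <;> simp <;> omega
        · rw [pv_mem_nbrs]
          exact ⟨Or.inr <| Or.inr <| Or.inr <| (by show (px, py) = (px, py - 1 + 1); rw [show py - 1 + 1 = py by omega]),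
            by unfold pvInB; exact ⟨hp1, hp2, hp3, hp4⟩, hfnb⟩
      · obtain ⟨x', y', hx', hy', he⟩ := hInv _ hb
        have hbnd : py ≤ 69 := by simp only [pvIdx] at *; omega
        have hidx : pvIdx (px, (py + 1 : Int)) = 72 + pvIdx (px, py) := by simp only [pvIdx] at *; omega
        refine ⟨(px, (py + 1 : Int)), ?_, by rw [hidx]; exact hb, ?_⟩
        · unfold pvInB
          refine ⟨?_, ?_, ?_, ?_⟩ <;> simp <;> omega
        · rw [pv_mem_nbrs]
          exact ⟨Or.inr <| Or.inr <| Or.inl <| (by show (px, py) = (px, py + 1 - 1); rw [show py + 1 - 1 = py by omega]),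
            by unfold pvInB; exact ⟨hp1, hp2, hp3, hp4⟩, hfnb⟩
  · rintro (h | ⟨hpb, q, hq, hqbit, hqnb⟩)
    · exact Or.inl h
    · obtain ⟨qx, qy⟩ := q
      obtain ⟨hq1, hq2, hq3, hq4⟩ := hq
      simp only at hq1 hq2 hq3 hq4
      refine Or.inr ⟨⟨px.toNat, py.toNat, by omega, by omega, by omega, ?_⟩, ?_⟩
      · have : ((px.toNat : Int), (py.toNat : Int)) = (px, py) := by
          have : (px.toNat : Int) = px ∧ (py.toNat : Int) = py := by constructor <;> omega
          rw [this.1, this.2]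
        rwa [this]
      · rw [pv_mem_nbrs] at hqnb
        obtain ⟨hd, _, _⟩ := hqnb
        rcases hd with hd | hd | hd | hd <;>
          rw [Prod.ext_iff] at hd <;> simp only at hd <;> obtain ⟨hdx, hdy⟩ := hd
        · -- (px,py) = (qx-1, qy): q is right neighbour: q bit at 1 + i
          refine Or.inr (Or.inl ?_)
          have : pvIdx (qx, qy) = 1 + pvIdx (px, py) := by simp only [pvIdx] at *; omega
          rwa [this] at hqbit
        · refine Or.inl ⟨by simp only [pvIdx] at *; omega, ?_⟩
          have : pvIdx (qx, qy) = pvIdx (px, py) - 1 := by simp only [pvIdx] at *; omega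
          rwa [this] at hqbit
        · refine Or.inr (Or.inr (Or.inr ?_))
          have : pvIdx (qx, qy) = 72 + pvIdx (px, py) := by simp only [pvIdx] at *; omega
          rwa [this] at hqbit
        · refine Or.inr (Or.inr (Or.inl ⟨by simp only [pvIdx] at *; omega, ?_⟩))
          have : pvIdx (qx, qy) = pvIdx (px, py) - 72 := by simp only [pvIdx] at *; omega
          rwa [this] at hqbit

lemma pv_BC_le (r : Nat) : pvBC r ≤ 5200 := by
  unfold pvBC
  calc ((Finset.range 5200).filter (fun i => r.testBit i)).card
      ≤ (Finset.range 5200).card := Finset.card_filter_le _ _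
    _ = 5200 := Finset.card_range 5200

lemma pv_BC_lt (r nxt : Nat) (hsub : ∀ i, r.testBit i = true → nxt.testBit i = true)
    (hne : nxt ≠ r) (hInv : pvRinv nxt) : pvBC r < pvBC nxt := by
  unfold pvBC
  apply Finset.card_lt_card
  rw [Finset.ssubset_iff_of_subset]
  · have hex : ∃ i, nxt.testBit i = true ∧ r.testBit i = false := by
      by_contra hno
      push Not at hno
      apply hne
      apply Nat.eq_of_testBit_eq
      intro i
      cases hri : r.testBit i
      · cases hni : nxt.testBit i
        · rfl
        · exact absurd hri (by simp [hno i hni])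
      · rw [hsub i hri]
    obtain ⟨i, hni, hri⟩ := hex
    refine ⟨i, ?_, ?_⟩
    · rw [Finset.mem_filter, Finset.mem_range]
      obtain ⟨x, y, hx, hy, rfl⟩ := hInv i hni
      exact ⟨by omega, hni⟩
    · rw [Finset.mem_filter]
      rintro ⟨-, hc⟩
      rw [hri] at hc
      exact absurd hc (by simp)
  · intro i hi
    rw [Finset.mem_filter] at hi ⊢
    exact ⟨hi.1, hsub i hi.2⟩

lemma pv_satLoop_target (b : PySem.Set (Int × Int)) :
    ∀ (fuel : Nat) (r : Nat), pvRinv r → pvSound b r → r.testBit 0 = true →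
      5201 ≤ fuel + pvBC r →
      ((pvSatLoop (pvFreeMask b) fuel r).testBit 5110 = true ↔ pvReach b (70, 70)) := by
  intro fuel
  induction fuel with
  | zero =>
    intro r _ _ _ hF
    exfalso
    have := pv_BC_le r
    omega
  | succ fuel ih =>
    intro r hInv hS h0 hF
    simp only [pvSatLoop]
    set nxt := r ||| (pvFreeMask b &&& ((r <<< 1) ||| (r >>> 1) ||| (r <<< 72) ||| (r >>> 72))) with hnxt
    have hsub : ∀ i, r.testBit i = true → nxt.testBit i = true := by
      intro i hi
      rw [hnxt, Nat.testBit_or, hi]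
      simp
    have hInv' : pvRinv nxt := by
      intro i hi
      rw [hnxt, pv_testBit_next] at hi
      rcases hi with hi | ⟨hf, -⟩
      · exact hInv i hi
      · obtain ⟨x, y, hx, hy, rfl, -⟩ := (pv_testBit_freeMask b i).mp hf
        exact ⟨x, y, hx, hy, rfl⟩
    split <;> rename_i heq
    · -- fixpoint: reached is closed
      constructor
      · intro hbit
        exact hS (70, 70) (by unfold pvInB; refine ⟨?_, ?_, ?_, ?_⟩ <;> simp) hbit
      · intro hr
        -- every reachable cell has its bit set in r
        have key : ∀ z, pvReach b z → (pvInB z ∧ r.testBit (pvIdx z) = true) := by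
          intro z hz
          induction hz with
          | refl =>
            refine ⟨by unfold pvInB; refine ⟨?_, ?_, ?_, ?_⟩ <;> simp, ?_⟩
            have : pvIdx (0, 0) = 0 := by simp [pvIdx]
            rw [this]
            exact h0
          | tail hmid hstep ihz =>
            rename_i mid z'
            obtain ⟨hmidB, hmidBit⟩ := ihz
            unfold pvStep at hstep
            rw [pv_mem_nbrs] at hstep
            obtain ⟨hd, hzB, hznb⟩ := hstep
            refine ⟨hzB, ?_⟩
            have : nxt.testBit (pvIdx z') = true := by
              rw [pv_bm_next b r hInv z' hzB]
              exact Or.inr ⟨hznb, mid, hmidB, hmidBit, by rw [pv_mem_nbrs]; exact ⟨hd, hzB, hznb⟩⟩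
            rwa [heq] at this
        have := key (70, 70) hr
        have h5110 : pvIdx (70, 70) = 5110 := by simp [pvIdx]
        rw [h5110] at this
        exact this.2
    · -- not a fixpoint: recurse
      have hS' : pvSound b nxt := by
        intro p hp hbit
        rw [hnxt, pv_bm_next b r hInv p hp] at hbit
        rcases hbit with hbit | ⟨hnb, q, hqB, hqbit, hqn⟩
        · exact hS p hp hbit
        · exact Relation.ReflTransGen.tail (hS q hqB hqbit) hqn
      have h0' : nxt.testBit 0 = true := hsub 0 h0
      have hlt : pvBC r < pvBC nxt := pv_BC_lt r nxt hsub heq hInv'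
      exact ih nxt hInv' hS' h0' (by omega)

lemma pv_testBit_via_shift (R : Nat) : (((R >>> 5110) &&& 1) == 1) = R.testBit 5110 := by
  rw [Nat.and_one_is_mod, Nat.shiftRight_eq_div_pow, Nat.testBit_eq_decide_div_mod_eq]
  cases h : decide (R / 2 ^ 5110 % 2 = 1)
  · simp only [decide_eq_false_iff_not] at h
    simpa using h
  · simp only [decide_eq_true_eq] at h
    simpa using h

lemma pv_idx_zero_decode (p : Int × Int) (hp : pvInB p) (h : pvIdx p = 0) : p = (0, 0) := by
  obtain ⟨px, py⟩ := p
  obtain ⟨h1, h2, h3, h4⟩ := hp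
  simp only at h1 h2 h3 h4
  simp only [pvIdx] at h
  have : px = 0 ∧ py = 0 := by omega
  rw [this.1, this.2]

lemma pv_testBit_one_imp (i : Nat) (h : Nat.testBit 1 i = true) : i = 0 := by
  by_contra hne
  rw [Nat.testBit_eq_decide_div_mod_eq] at h
  simp only [decide_eq_true_eq] at h
  have h2 : 1 < 2 ^ i := Nat.one_lt_two_pow hne
  rw [Nat.div_eq_of_lt h2] at h
  simp at h

lemma pv_connected_iff' (b : PySem.Set (Int × Int)) :
    ((((pvSatLoop (pvFreeMask b) 5200 1) >>> (70 * 72 + 70)) &&& 1 == 1) = true ↔ pvReach b (70, 70)) := by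
  have hb1 : (1 : Nat).testBit 0 = true := by decide
  have hRinv : pvRinv 1 := by
    intro i hi
    rw [pv_testBit_one_imp i hi]
    exact ⟨0, 0, by omega, by omega, by omega⟩
  have hS : pvSound b 1 := by
    intro p hp hbit
    rw [pv_idx_zero_decode p hp (pv_testBit_one_imp _ hbit)]
    exact Relation.ReflTransGen.refl
  have hBC : 1 ≤ pvBC 1 := by
    apply Finset.card_pos.mpr
    exact ⟨0, by rw [Finset.mem_filter, Finset.mem_range]; exact ⟨by omega, hb1⟩⟩
  have := pv_satLoop_target b 5200 1 hRinv hS hb1 (by omega)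
  rw [show (70 * 72 + 70 : Nat) = 5110 by norm_num, pv_testBit_via_shift]
  exact this

lemma pv_connected_iff (b : PySem.Set (Int × Int)) :
    (pvConnected b = true ↔ pvReach b (70, 70)) := by
  unfold pvConnected
  exact pv_connected_iff' b

lemma pv_search_eq (data : List (Int × Int)) :
    ∀ (fuel : Nat) (low high : Int), pvSearchA data fuel low high = pvSearchB data fuel low high := by
  intro fuel
  induction fuel with
  | zero => intro low high; rfl
  | succ fuel ih =>
    intro low high
    simp only [pvSearchA, pvSearchB]
    by_cases hlh : low < high
    · rw [if_pos hlh, if_pos hlh]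
      set mid := PySem.Int.floordiv (low + high) 2 with hmid
      set bl := PySem.Set.ofList (PySem.List.slice data none (some mid)) with hbl
      by_cases hc : pvConnected bl = true
      · rw [if_pos hc]
        have hr : pvReach bl (70, 70) := (pv_connected_iff bl).mp hc
        have hne : ¬ (pvBfs (0, 0) (70, 70) ((0, 0), (70, 70)) bl = -1) := by
          rw [pv_bfs_neg1_iff]
          exact fun h => h hr
        rw [if_neg hne]
        exact ih (mid + 1) high
      · rw [if_neg hc]
        have hr : ¬ pvReach bl (70, 70) := fun h => hc ((pv_connected_iff bl).mpr h)
        have heq : pvBfs (0, 0) (70, 70) ((0, 0), (70, 70)) bl = -1 :=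
          (pv_bfs_neg1_iff bl).mpr hr
        rw [if_pos heq]
        exact ih low mid
    · rw [if_neg hlh, if_neg hlh]

-- ===== VERDICT (by name: the statement is the Claim_ definition above) =====
theorem find_first_failure_spec : Claim_equal_find_first_failure := by
  intro data _
  unfold Spec_find_first_failure find_first_failure find_first_failure_alt
  exact pv_search_eq data _ _ _
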